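-- pv_equiv track=rewrite | github.com/moehein-92/Computing-in-Python | CapConsonants.py | count_capital_consonants
-- ===== SOURCE A (Python) =====
-- def count_capital_consonants(string):
--     count = 0
--     vowels = ["A", "E", "I", "O", "U"]
--     for i in string:
--         if ord(i) >= 65 and ord(i) <= 90:
--             if not i in vowels:
--                 count += 1
--     return count
-- ===== SOURCE B (Python) =====
-- def count_capital_consonants(string):
--     freq = {}
--     for ch in string:
--         freq[ch] = freq.get(ch, 0) + 1
--     return sum(freq.get(c, 0) for c in "BCDFGHJKLMNPQRSTVWXYZ")
-- ===== Notes on version B (the rewrite author's own statement) =====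
-- stated objective: alternative
-- what changed: Replaces the per-character accept/reject loop with a histogram: build a character-frequency dict in one pass, then sum the 21 consonant-letter lookups; it trades the inner range/vowel test for a table of counts.
import Mathlib
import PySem

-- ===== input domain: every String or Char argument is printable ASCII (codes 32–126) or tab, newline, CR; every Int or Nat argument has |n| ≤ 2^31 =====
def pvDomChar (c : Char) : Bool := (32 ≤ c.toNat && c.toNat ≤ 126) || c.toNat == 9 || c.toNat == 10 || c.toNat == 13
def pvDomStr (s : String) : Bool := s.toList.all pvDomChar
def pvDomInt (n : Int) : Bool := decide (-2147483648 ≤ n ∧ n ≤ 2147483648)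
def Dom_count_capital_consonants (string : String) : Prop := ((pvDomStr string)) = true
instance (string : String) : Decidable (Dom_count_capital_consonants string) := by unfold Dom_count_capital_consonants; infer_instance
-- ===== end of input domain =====

-- B builds a character-frequency dict in one pass and sums the 21 consonant-letter lookups (alternative algorithm, same cost).

-- ===== PORT A =====
def count_capital_consonants (string : String) : Int :=
  string.toList.foldl (fun count i =>
    if i.toNat ≥ 65 ∧ i.toNat ≤ 90 then
      if ¬ (i ∈ ['A', 'E', 'I', 'O', 'U']) then count + 1 else count
    else count) 0

-- ===== PORT B =====
def count_capital_consonants_alt (string : String) : Int :=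
  let freq : PySem.Dict Char Int :=
    string.toList.foldl (fun d ch => d.insert ch (d.getD ch 0 + 1)) PySem.Dict.empty
  ("BCDFGHJKLMNPQRSTVWXYZ".toList.map (fun c => freq.getD c 0)).sum

-- ===== PRECONDITION & SPEC =====
def Spec_count_capital_consonants (string : String) (out : Int) : Prop := out = count_capital_consonants_alt string
instance (string : String) (out : Int) : Decidable (Spec_count_capital_consonants string out) := by unfold Spec_count_capital_consonants; infer_instance

-- ===== CLAIM (what is proved, stated in full; the proofs are below) =====
def Claim_equal_count_capital_consonants : Prop := ∀ (string : String), Dom_count_capital_consonants string → Spec_count_capital_consonants string (count_capital_consonants string)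

-- ===== LEMMAS AND PROOFS =====

def pvConsL : List Char := ['B','C','D','F','G','H','J','K','L','M','N','P','Q','R','S','T','V','W','X','Y','Z']

theorem pv_consList : "BCDFGHJKLMNPQRSTVWXYZ".toList = pvConsL := by decide

theorem pv_char_eq (c d : Char) : c = d ↔ c.toNat = d.toNat :=
  ⟨fun h => h ▸ rfl, fun h => Char.ext (UInt32.toNat_inj.mp h)⟩

theorem pv_mem_cons (x : Char) :
    x ∈ pvConsL ↔ (x.toNat ≥ 65 ∧ x.toNat ≤ 90 ∧ ¬ (x ∈ ['A', 'E', 'I', 'O', 'U'])) := by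
  have hA : ('A').toNat = 65 := rfl
  have hB : ('B').toNat = 66 := rfl
  have hC : ('C').toNat = 67 := rfl
  have hD : ('D').toNat = 68 := rfl
  have hE : ('E').toNat = 69 := rfl
  have hF : ('F').toNat = 70 := rfl
  have hG : ('G').toNat = 71 := rfl
  have hH : ('H').toNat = 72 := rfl
  have hI : ('I').toNat = 73 := rfl
  have hJ : ('J').toNat = 74 := rfl
  have hK : ('K').toNat = 75 := rfl
  have hL : ('L').toNat = 76 := rfl
  have hM : ('M').toNat = 77 := rfl
  have hN : ('N').toNat = 78 := rfl
  have hO : ('O').toNat = 79 := rfl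
  have hP : ('P').toNat = 80 := rfl
  have hQ : ('Q').toNat = 81 := rfl
  have hR : ('R').toNat = 82 := rfl
  have hS : ('S').toNat = 83 := rfl
  have hT : ('T').toNat = 84 := rfl
  have hU : ('U').toNat = 85 := rfl
  have hV : ('V').toNat = 86 := rfl
  have hW : ('W').toNat = 87 := rfl
  have hX : ('X').toNat = 88 := rfl
  have hY : ('Y').toNat = 89 := rfl
  have hZ : ('Z').toNat = 90 := rfl
  simp only [pvConsL, List.mem_cons, List.not_mem_nil, or_false, pv_char_eq,
    hA, hB, hC, hD, hE, hF, hG, hH, hI, hJ, hK, hL, hM, hN, hO, hP, hQ, hR, hS, hT,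
    hU, hV, hW, hX, hY, hZ]
  omega

theorem pv_ind_sum (x : Char) (L : List Char) :
    (L.map (fun c => if c = x then (1 : Int) else 0)).sum
      = if x ∈ L then (L.count x : Int) else 0 := by
  induction L with
  | nil => simp
  | cons a t ih =>
    simp only [List.map_cons, List.sum_cons, ih, List.mem_cons, List.count_cons]
    by_cases hax : a = x
    · subst hax
      by_cases hm : a ∈ t
      · simp [hm]; omega
      · simp [hm, List.count_eq_zero.mpr hm]
    · have hxa : ¬ x = a := fun h => hax h.symm
      by_cases hm : x ∈ t <;> simp [hax, hxa, hm]

theorem pv_cons_nodup_sum (x : Char) :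
    (pvConsL.map (fun c => if c = x then (1 : Int) else 0)).sum
      = if x ∈ pvConsL then (1 : Int) else 0 := by
  rw [pv_ind_sum]
  by_cases hm : x ∈ pvConsL
  · have hnd : pvConsL.Nodup := by decide
    have h1 : pvConsL.count x = 1 := List.count_eq_one_of_mem hnd hm
    simp [hm, h1]
  · simp [hm]

theorem pv_fold_fun :
    (fun (count : Int) (i : Char) =>
      if i.toNat ≥ 65 ∧ i.toNat ≤ 90 then
        if ¬ (i ∈ ['A', 'E', 'I', 'O', 'U']) then count + 1 else count
      else count)
    = (fun (count : Int) (i : Char) =>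
      if i.toNat ≥ 65 ∧ i.toNat ≤ 90 ∧ ¬ (i ∈ ['A', 'E', 'I', 'O', 'U']) then count + 1 else count) := by
  funext count i
  split_ifs <;> tauto

theorem pv_countP_eq_sum (l : List Char) :
    ((l.countP (fun x => decide (x.toNat ≥ 65 ∧ x.toNat ≤ 90 ∧ ¬ (x ∈ ['A', 'E', 'I', 'O', 'U'])))) : Int)
      = (pvConsL.map (fun c => (l.count c : Int))).sum := by
  induction l with
  | nil => simp [pvConsL]
  | cons x t ih =>
    rw [List.countP_cons]
    have hcnt : (fun c => ((x :: t).count c : Int))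
        = (fun c => (t.count c : Int) + if c = x then (1 : Int) else 0) := by
      funext c
      rw [List.count_cons]
      by_cases h : c = x
      · simp [h]
      · have : ¬ x = c := fun hh => h hh.symm
        simp [h, this]
    rw [hcnt, PySem.List.sum_map_add_int, ← ih, pv_cons_nodup_sum]
    simp only [decide_eq_true_eq]
    by_cases hp : x.toNat ≥ 65 ∧ x.toNat ≤ 90 ∧ ¬ (x ∈ ['A', 'E', 'I', 'O', 'U'])
    · rw [if_pos hp, if_pos ((pv_mem_cons x).mpr hp)]
      push_cast; ring
    · rw [if_neg hp, if_neg (fun h => hp ((pv_mem_cons x).mp h))]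
      push_cast; ring

-- ===== VERDICT (by name: the statement is the Claim_ definition above) =====
theorem count_capital_consonants_spec : Claim_equal_count_capital_consonants := by
  intro s _
  unfold Spec_count_capital_consonants count_capital_consonants count_capital_consonants_alt
  rw [pv_fold_fun, PySem.List.foldl_ite_add_one, pv_consList]
  simp only [PySem.Dict.getD_foldl_insert_add_one]
  rw [pv_countP_eq_sum]
  simp [PySem.Dict.empty, PySem.Dict.getD, PySem.Dict.get?]
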